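-- pv_equiv track=rewrite | github.com/searchbb/knowledge-fabric | backend/app/services/graph_builder.py | _has_unbalanced_quotes
-- ===== SOURCE A (Python) =====
-- def _has_unbalanced_quotes(text: str) -> bool:
--     quote_count = 0
--     escaped = False
--     for char in text:
--         if char == '\\' and not escaped:
--             escaped = True
--             continue
--         if char == '"' and not escaped:
--             quote_count += 1
--         escaped = False
--     return quote_count % 2 == 1
-- ===== SOURCE B (Python) =====
-- def _has_unbalanced_quotes(text: str) -> bool:
--     # Staged strategy: split the text on backslashes, then count quotes per
--     # segment. The first segment is counted fully; a non-empty later segment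
--     # lost its first character to the preceding backslash (escaped), an empty
--     # later segment means the preceding backslash escaped the next backslash,
--     # so the segment after it is counted fully.
--     parts = text.split('\\')
--     total = parts[0].count('"')
--     i = 1
--     while i < len(parts):
--         if parts[i]:
--             total += parts[i][1:].count('"')
--             i += 1
--         else:
--             if i + 1 < len(parts):
--                 total += parts[i + 1].count('"')
--             i += 2
--     return total % 2 == 1
-- ===== Notes on version B (the rewrite author's own statement) =====
-- stated objective: faster
-- what changed: Replaces A's per-character escaped-flag state machine with a staged strategy: split the text on backslashes once, count quotes per segment with str.count (dropping each later segment's escaped first character, and handling escaped backslashes by consuming the following segment whole), then take the parity of the total; the per-character Python loop is replaced by C-level split/count passes.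
import Mathlib
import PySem

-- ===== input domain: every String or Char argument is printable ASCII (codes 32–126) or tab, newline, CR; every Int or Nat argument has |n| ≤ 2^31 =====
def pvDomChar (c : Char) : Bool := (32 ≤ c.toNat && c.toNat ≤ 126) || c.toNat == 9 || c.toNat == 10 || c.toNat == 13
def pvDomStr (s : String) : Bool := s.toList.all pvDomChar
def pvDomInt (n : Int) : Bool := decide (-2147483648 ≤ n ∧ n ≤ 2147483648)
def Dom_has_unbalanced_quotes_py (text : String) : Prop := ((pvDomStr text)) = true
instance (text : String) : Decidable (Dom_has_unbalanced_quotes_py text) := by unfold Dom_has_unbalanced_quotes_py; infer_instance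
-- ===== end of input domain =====

-- B replaces A's per-character escaped-flag state machine by a staged strategy:
-- split on backslashes, count quotes per segment (dropping each segment's escaped
-- first character), then take the parity once (a timing run measured B faster by a constant factor).

-- ===== PORT A =====
-- A's loop: state (quote_count, escaped), one character per step.
def hubGoA : List Char → Int → Bool → Int
  | [], cnt, _ => cnt
  | c :: t, cnt, escaped =>
    if c = '\\' ∧ ¬ escaped then
      hubGoA t cnt true              -- escaped = True; continue
    else
      hubGoA t (if c = '"' ∧ ¬ escaped then cnt + 1 else cnt) false

def has_unbalanced_quotes_py (text : String) : Bool :=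
  (hubGoA text.toList 0 false) % 2 == 1

-- ===== PORT B =====
-- p.count('"')  (PySem.Chars.count is Python str.count on code points)
def hubCount (p : List Char) : Int := (PySem.Chars.count p ['"'] : Int)

-- B's while loop over parts[1:]: a non-empty part lost its first (escaped) char,
-- an empty part means the backslash escaped the next backslash, so the following
-- part is counted fully and the index advances by 2.
def hubGoB : List (List Char) → Int
  | [] => 0
  | [] :: [] => 0                          -- i + 1 ≥ len(parts): nothing added
  | [] :: q :: rest => hubCount q + hubGoB rest
  | (_ :: p) :: rest => hubCount p + hubGoB rest   -- parts[i][1:].count('"')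

def has_unbalanced_quotes_py_alt (text : String) : Bool :=
  match PySem.Chars.splitOn text.toList ['\\'] with   -- text.split('\\')
  | [] => false                                       -- unreachable: split is never empty
  | p0 :: rest => (hubCount p0 + hubGoB rest) % 2 == 1

-- ===== PRECONDITION & SPEC =====
def Spec_has_unbalanced_quotes_py (text : String) (out : Bool) : Prop := out = has_unbalanced_quotes_py_alt text
instance (text : String) (out : Bool) : Decidable (Spec_has_unbalanced_quotes_py text out) := by unfold Spec_has_unbalanced_quotes_py; infer_instance

-- ===== CLAIM (what is proved, stated in full; the proofs are below) =====
def Claim_equal_has_unbalanced_quotes_py : Prop := ∀ (text : String), Dom_has_unbalanced_quotes_py text → Spec_has_unbalanced_quotes_py text (has_unbalanced_quotes_py text)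

-- ===== LEMMAS AND PROOFS =====

-- reference split: structural recursion, proved equal to PySem.Chars.splitOn · ['\\']
def mySplit : List Char → List (List Char)
  | [] => [[]]
  | c :: t =>
    if c = '\\' then [] :: mySplit t
    else match mySplit t with
      | [] => [[c]]          -- unreachable
      | p :: ps => (c :: p) :: ps

theorem mySplit_ne_nil (l : List Char) : mySplit l ≠ [] := by
  cases l with
  | nil => simp [mySplit]
  | cons c t =>
    simp only [mySplit]
    split_ifs
    · simp
    · cases h : mySplit t <;> simp

theorem splitOn_go_cons (sep : List Char) (f : Nat) (c : Char) (t cur : List Char)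
    (acc : List (List Char)) :
    PySem.Chars.splitOn.go sep (f + 1) (c :: t) cur acc
      = if sep.isPrefixOf (c :: t)
        then PySem.Chars.splitOn.go sep f (List.drop sep.length (c :: t)) [] (cur.reverse :: acc)
        else PySem.Chars.splitOn.go sep f t (c :: cur) acc := rfl

theorem splitOn_go_eq (l : List Char) : ∀ (fuel : Nat) (cur : List Char) (acc : List (List Char)),
    l.length ≤ fuel →
    PySem.Chars.splitOn.go ['\\'] fuel l cur acc
      = acc.reverse ++ (cur.reverse ++ (mySplit l).headI) :: (mySplit l).tail := by
  induction l with
  | nil =>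
    intro fuel cur acc _
    cases fuel <;> simp [PySem.Chars.splitOn.go, mySplit]
  | cons c t ih =>
    intro fuel cur acc hf
    cases fuel with
    | zero => simp at hf
    | succ f =>
      rw [splitOn_go_cons]
      by_cases hc : c = '\\'
      · subst hc
        rw [if_pos (by simp [List.isPrefixOf])]
        simp only [List.length_singleton, List.drop_succ_cons, List.drop_zero]
        rw [ih f [] (cur.reverse :: acc) (by simpa using hf)]
        obtain ⟨p, ps, hps⟩ : ∃ p ps, mySplit t = p :: ps := by
          cases h : mySplit t with
          | nil => exact absurd h (mySplit_ne_nil t)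
          | cons p ps => exact ⟨p, ps, rfl⟩
        simp [mySplit, hps]
      · rw [if_neg (by simp [List.isPrefixOf]; exact fun h => hc h.symm)]
        rw [ih f (c :: cur) acc (by simpa using hf)]
        simp only [mySplit, if_neg hc]
        obtain ⟨p, ps, hps⟩ : ∃ p ps, mySplit t = p :: ps := by
          cases h : mySplit t with
          | nil => exact absurd h (mySplit_ne_nil t)
          | cons p ps => exact ⟨p, ps, rfl⟩
        simp [hps]

theorem splitOn_eq (l : List Char) : PySem.Chars.splitOn l ['\\'] = mySplit l := by
  have h := splitOn_go_eq l (l.length + 1) [] [] (by omega)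
  obtain ⟨p, ps, hps⟩ : ∃ p ps, mySplit l = p :: ps := by
    cases hm : mySplit l with
    | nil => exact absurd hm (mySplit_ne_nil l)
    | cons p ps => exact ⟨p, ps, rfl⟩
  simp only [PySem.Chars.splitOn]
  rw [h, hps]
  simp

theorem count_go_cons (sub : List Char) (f : Nat) (c : Char) (t : List Char) (acc : Nat) :
    PySem.Chars.count.go sub (f + 1) (c :: t) acc
      = if sub.isPrefixOf (c :: t)
        then PySem.Chars.count.go sub f (List.drop sub.length (c :: t)) (acc + 1)
        else PySem.Chars.count.go sub f t acc := rfl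

theorem count_go_eq (l : List Char) : ∀ (fuel acc : Nat), l.length ≤ fuel →
    PySem.Chars.count.go ['"'] fuel l acc = acc + l.count '"' := by
  induction l with
  | nil => intro fuel acc _; cases fuel <;> simp [PySem.Chars.count.go]
  | cons c t ih =>
    intro fuel acc hf
    cases fuel with
    | zero => simp at hf
    | succ f =>
      rw [count_go_cons]
      by_cases hc : c = '"'
      · subst hc
        rw [if_pos (by simp [List.isPrefixOf])]
        simp only [List.length_singleton, List.drop_succ_cons, List.drop_zero]
        rw [ih f (acc + 1) (by simpa using hf)]
        simp
        omega
      · rw [if_neg (by simp [List.isPrefixOf]; exact fun h => hc h.symm)]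
        rw [ih f acc (by simpa using hf)]
        simp [hc]

theorem hubCount_eq (l : List Char) : hubCount l = (l.count '"' : Int) := by
  unfold hubCount
  have h : PySem.Chars.count l ['"'] = l.count '"' := by
    simp only [PySem.Chars.count, List.isEmpty_cons, Bool.false_eq_true, if_false]
    simpa using count_go_eq l l.length 0 le_rfl
  rw [h]

-- B's total over the parts of l
def hubTotal : List (List Char) → Int
  | [] => 0
  | p :: rest => hubCount p + hubGoB rest

theorem hubGoA_escaped (c : Char) (t : List Char) (cnt : Int) :
    hubGoA (c :: t) cnt true = hubGoA t cnt false := by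
  simp [hubGoA]

theorem main_eq : ∀ (n : Nat) (l : List Char), l.length ≤ n → ∀ (cnt : Int),
    hubGoA l cnt false = cnt + hubTotal (mySplit l) := by
  intro n
  induction n with
  | zero =>
    intro l hl cnt
    have : l = [] := List.eq_nil_of_length_eq_zero (Nat.le_zero.mp hl)
    subst this
    simp [hubGoA, mySplit, hubTotal, hubGoB, hubCount_eq]
  | succ n ih =>
    intro l hl cnt
    cases l with
    | nil => simp [hubGoA, mySplit, hubTotal, hubGoB, hubCount_eq]
    | cons c t =>
      by_cases hc : c = '\\'
      · subst hc
        rw [show hubGoA ('\\' :: t) cnt false = hubGoA t cnt true by simp [hubGoA]]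
        cases t with
        | nil => simp [hubGoA, mySplit, hubTotal, hubGoB, hubCount_eq]
        | cons d t' =>
          rw [hubGoA_escaped]
          have ht' : t'.length ≤ n := by simp at hl; omega
          obtain ⟨q, rest, hq⟩ : ∃ q rest, mySplit t' = q :: rest := by
            cases h : mySplit t' with
            | nil => exact absurd h (mySplit_ne_nil t')
            | cons q rest => exact ⟨q, rest, rfl⟩
          rw [ih t' ht' cnt]
          by_cases hd : d = '\\'
          · subst hd
            simp [mySplit, hq, hubTotal, hubGoB, hubCount_eq]
          · simp [mySplit, hd, hq, hubTotal, hubGoB, hubCount_eq]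
      · rw [show hubGoA (c :: t) cnt false
              = hubGoA t (if c = '"' ∧ ¬ false then cnt + 1 else cnt) false by
            simp [hubGoA, hc]]
        have ht : t.length ≤ n := by simpa using hl
        obtain ⟨p, ps, hp⟩ : ∃ p ps, mySplit t = p :: ps := by
          cases h : mySplit t with
          | nil => exact absurd h (mySplit_ne_nil t)
          | cons p ps => exact ⟨p, ps, rfl⟩
        by_cases hq : c = '"'
        · subst hq
          rw [if_pos (by simp)]
          rw [ih t ht (cnt + 1)]
          simp only [mySplit, if_neg hc, hp, hubTotal, hubCount_eq, List.count_cons]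
          push_cast
          simp only [if_true]
          ring
        · rw [if_neg (by simp [hq])]
          rw [ih t ht cnt]
          simp [mySplit, hc, hp, hubTotal, hubCount_eq, hq]

-- ===== VERDICT (by name: the statement is the Claim_ definition above) =====
theorem has_unbalanced_quotes_py_spec : Claim_equal_has_unbalanced_quotes_py := by
  intro text _
  unfold Spec_has_unbalanced_quotes_py has_unbalanced_quotes_py has_unbalanced_quotes_py_alt
  rw [splitOn_eq]
  obtain ⟨p, ps, hp⟩ : ∃ p ps, mySplit text.toList = p :: ps := by
    cases h : mySplit text.toList with
    | nil => exact absurd h (mySplit_ne_nil text.toList)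
    | cons p ps => exact ⟨p, ps, rfl⟩
  rw [hp, main_eq text.toList.length text.toList le_rfl 0, hp]
  simp [hubTotal]
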